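-- pv_equiv track=rewrite | github.com/khabib23-h/ThreatPulse | ThreatPulse/threatpulse.py | _parse_windows_tasklist
-- ===== SOURCE A (Python) =====
-- from typing import Dict, List, Optional, Tuple, Any
--
-- def _parse_windows_tasklist(output: str) -> List[Dict]:
--     """Parse Windows tasklist output"""
--     processes = []
--     lines = output.strip().split('\n')
--
--     if len(lines) > 1:  # Has header
--         headers = [h.strip('"') for h in lines[0].split('","')]
--         for line in lines[1:]:
--             values = [v.strip('"') for v in line.split('","')]
--             if len(values) >= len(headers):
--                 proc_info = {headers[i]: values[i] for i in range(len(headers))}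
--                 processes.append({
--                     'name': proc_info.get('Image Name', ''),
--                     'pid': proc_info.get('PID', ''),
--                     'user': proc_info.get('User Name', ''),
--                     'command': proc_info.get('Window Title', '') or proc_info.get('Image Name', '')
--                 })
--
--     return processes
-- ===== SOURCE B (Python) =====
-- def _parse_windows_tasklist(output):
--     """Parse Windows tasklist output column-wise: extract whole columns, then zip."""
--     lines = output.strip().split('\n')
--     if len(lines) < 2:
--         return []
--     headers = [h.strip('"') for h in lines[0].split('","')]
--     rows = [r for r in ([v.strip('"') for v in line.split('","')] for line in lines[1:])
--             if len(r) >= len(headers)]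
--
--     def column(name):
--         if name in headers:
--             i = headers.index(name)
--             return [r[i] for r in rows]
--         return [''] * len(rows)
--
--     names = column('Image Name')
--     pids = column('PID')
--     users = column('User Name')
--     titles = column('Window Title')
--     return [{'name': n, 'pid': p, 'user': u, 'command': t or n}
--             for n, p, u, t in zip(names, pids, users, titles)]
-- ===== Notes on version B (the rewrite author's own statement) =====
-- stated objective: alternative
-- what changed: B parses column-wise: it filters the data rows once, extracts each of the four needed columns as a whole list (by the header's first-occurrence index, or a column of '' when absent) and zips the four columns into records, instead of A's row-wise dict-of-all-columns with .get lookups; Pre_ excludes inputs whose header row repeats one of the four extracted column names, where A's dict comprehension keeps the last occurrence and B's column uses the first, neither being specified for a duplicate column name.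
import Mathlib
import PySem

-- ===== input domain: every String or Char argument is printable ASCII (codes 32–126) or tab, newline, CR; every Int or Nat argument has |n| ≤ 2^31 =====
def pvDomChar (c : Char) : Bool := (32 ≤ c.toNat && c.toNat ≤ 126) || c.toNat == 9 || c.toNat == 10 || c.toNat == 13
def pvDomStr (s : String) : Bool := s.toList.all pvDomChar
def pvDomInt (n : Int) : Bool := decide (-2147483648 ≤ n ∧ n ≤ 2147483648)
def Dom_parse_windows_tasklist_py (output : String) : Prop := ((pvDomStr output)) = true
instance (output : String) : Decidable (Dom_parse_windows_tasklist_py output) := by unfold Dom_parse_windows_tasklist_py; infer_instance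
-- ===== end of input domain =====

-- B parses column-wise (whole columns by first-occurrence header index, zipped into records)
-- instead of A's row-wise dict of all columns; objective: alternative decomposition.

-- values/headers of one CSV line: [x.strip('"') for x in line.split('","')]  (same literal code in both Pythons)
def pvSplitVals (line : String) : List String :=
  ((PySem.Str.split? line "\",\"").getD []).map (fun v => PySem.Str.stripChars v "\"")

-- ===== PORT A =====
def parse_windows_tasklist_py (output : String) : List (List (String × String)) :=
  let lines := (PySem.Str.split? (PySem.Str.strip output) "\n").getD []
  if 1 < lines.length then
    let headers := pvSplitVals (lines.getD 0 "")
    lines.tail.foldl (fun processes line =>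
      let values := pvSplitVals line
      if headers.length ≤ values.length then
        let proc_info := (List.range headers.length).foldl
          (fun d i => d.insert (headers.getD i "") (values.getD i "")) PySem.Dict.empty
        processes ++ [[("name", proc_info.getD "Image Name" ""),
                       ("pid", proc_info.getD "PID" ""),
                       ("user", proc_info.getD "User Name" ""),
                       ("command", if proc_info.getD "Window Title" "" = ""
                                   then proc_info.getD "Image Name" ""
                                   else proc_info.getD "Window Title" "")]]
      else processes) []
  else []

-- ===== PORT B =====
-- column(name): the whole column at headers.index(name) (in range: every kept row has
-- len(r) ≥ len(headers) > index), or a column of '' when the name is absent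
def pvColumn (headers : List String) (rows : List (List String)) (name : String) : List String :=
  if headers.contains name then
    rows.map (fun r => r.getD ((PySem.List.index? headers name).getD 0) "")
  else
    List.replicate rows.length ""

def parse_windows_tasklist_py_alt (output : String) : List (List (String × String)) :=
  let lines := (PySem.Str.split? (PySem.Str.strip output) "\n").getD []
  if lines.length < 2 then []
  else
    let headers := pvSplitVals (lines.getD 0 "")
    let rows := (lines.tail.map pvSplitVals).filter (fun r => headers.length ≤ r.length)
    let names := pvColumn headers rows "Image Name"
    let pids := pvColumn headers rows "PID"
    let users := pvColumn headers rows "User Name"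
    let titles := pvColumn headers rows "Window Title"
    (names.zip (pids.zip (users.zip titles))).map
      (fun x => [("name", x.1), ("pid", x.2.1), ("user", x.2.2.1),
                 ("command", if x.2.2.2 = "" then x.1 else x.2.2.2)])

-- ===== PRECONDITION & SPEC =====
-- Pre_ excludes inputs whose header row repeats one of the four extracted column names:
-- there A's dict comprehension keeps the LAST occurrence and B's column uses the FIRST,
-- and neither choice is specified for a duplicate column name (both are defensible).
def Pre_parse_windows_tasklist_py (output : String) : Prop :=
  let headers := pvSplitVals
    (((PySem.Str.split? (PySem.Str.strip output) "\n").getD []).getD 0 "")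
  headers.count "Image Name" ≤ 1 ∧ headers.count "PID" ≤ 1 ∧
    headers.count "User Name" ≤ 1 ∧ headers.count "Window Title" ≤ 1
instance (output : String) : Decidable (Pre_parse_windows_tasklist_py output) := by
  unfold Pre_parse_windows_tasklist_py; infer_instance

def pvWitness_parse_windows_tasklist_py : String :=
  "\"Image Name\",\"PID\"\n\"calc.exe\",\"7\""

def Spec_parse_windows_tasklist_py (output : String) (out : List (List (String × String))) : Prop := out = parse_windows_tasklist_py_alt output
instance (output : String) (out : List (List (String × String))) : Decidable (Spec_parse_windows_tasklist_py output out) := by unfold Spec_parse_windows_tasklist_py; infer_instance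

-- ===== CLAIM =====
def Claim_equal_parse_windows_tasklist_py : Prop := ∀ (output : String), Dom_parse_windows_tasklist_py output → Pre_parse_windows_tasklist_py output → Spec_parse_windows_tasklist_py output (parse_windows_tasklist_py output)

-- ===== LEMMAS AND PROOFS =====

-- last-occurrence index as computed by A's dict fold (proof-side characterisation only)
def pvLastIdx (headers : List String) (name : String) : Nat → Option Nat
  | 0 => none
  | i + 1 => if headers.getD i "" = name then some i else pvLastIdx headers name i

-- the value B's column picks out of one row
def pvColF (headers : List String) (name : String) (r : List String) : String :=
  if headers.contains name then r.getD ((PySem.List.index? headers name).getD 0) "" else ""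

-- A's per-line dict lookup equals the value at the last occurrence of the header
lemma pv_dict_eq_last (hs vs : List String) (k : String) (n : Nat) :
    ((List.range n).foldl (fun d i => d.insert (hs.getD i "") (vs.getD i ""))
        PySem.Dict.empty).getD k "" =
      (match pvLastIdx hs k n with | some i => vs.getD i "" | none => "") := by
  induction n with
  | zero => rfl
  | succ n ih =>
      rw [List.range_succ, List.foldl_append]
      simp only [List.foldl, PySem.Dict.getD_insert, pvLastIdx]
      by_cases h : hs.getD n "" = k
      · rw [if_pos h.symm, if_pos h]
      · rw [if_neg (fun e => h e.symm), if_neg h]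
        exact ih

-- with no duplicate occurrence of k, the last occurrence over the whole list is the first
lemma pvLastIdx_succ (hs : List String) (k : String) (n : Nat) :
    pvLastIdx hs k (n + 1) = if hs.getD n "" = k then some n else pvLastIdx hs k n := rfl

lemma pv_last_cons (a : String) (t : List String) (k : String) (n : Nat) :
    pvLastIdx (a :: t) k (n + 1) =
      match pvLastIdx t k n with
      | some i => some (i + 1)
      | none => if a = k then some 0 else none := by
  induction n with
  | zero => simp [pvLastIdx]
  | succ n ih =>
      have hget : (a :: t).getD (n + 1) "" = t.getD n "" := rfl
      rw [pvLastIdx_succ (a :: t) k (n + 1), hget, ih, pvLastIdx_succ t k n]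
      by_cases h : t.getD n "" = k
      · rw [if_pos h, if_pos h]
      · rw [if_neg h, if_neg h]

lemma pv_last_none (t : List String) (k : String) (h : k ∉ t) :
    ∀ n, n ≤ t.length → pvLastIdx t k n = none := by
  intro n
  induction n with
  | zero => intro _; rfl
  | succ n ih =>
      intro hn
      have hlt : n < t.length := by omega
      have hg : t.getD n "" = t[n] := by
        rw [List.getD_eq_getElem?_getD, List.getElem?_eq_getElem hlt]; rfl
      rw [pvLastIdx_succ, hg,
        if_neg (fun e => h (by rw [← e]; exact List.getElem_mem hlt)), ih (by omega)]

lemma pv_last_eq_first (hs : List String) (k : String) (hc : hs.count k ≤ 1) :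
    pvLastIdx hs k hs.length = PySem.List.index? hs k := by
  induction hs with
  | nil => rfl
  | cons a t ih =>
      have hlen : (a :: t).length = t.length + 1 := rfl
      rw [hlen, pv_last_cons]
      by_cases ha : a = k
      · subst ha
        have hnot : a ∉ t := by
          intro hm
          have h1 : 1 ≤ t.count a := List.one_le_count_iff.mpr hm
          simp [List.count_cons_self] at hc; omega
        rw [pv_last_none t a hnot t.length (le_refl _), PySem.List.index?_cons_self]
        simp
      · have hct : t.count k ≤ 1 := by
          rw [List.count_cons] at hc; omega
        rw [ih hct, PySem.List.index?_cons_of_ne t ha]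
        cases PySem.List.index? t k with
        | none => simp [ha]
        | some i => simp

-- A's per-line dict lookup equals B's column value, when k occurs at most once
lemma pv_dict_eq_colF (hs vs : List String) (k : String) (hc : hs.count k ≤ 1) :
    ((List.range hs.length).foldl (fun d i => d.insert (hs.getD i "") (vs.getD i ""))
        PySem.Dict.empty).getD k "" = pvColF hs k vs := by
  rw [pv_dict_eq_last, pv_last_eq_first hs k hc]
  unfold pvColF
  by_cases hm : hs.contains k
  · have hmem : k ∈ hs := by simpa using hm
    obtain ⟨i, hi⟩ := Option.isSome_iff_exists.mp ((PySem.List.index?_isSome_iff hs k).mpr hmem)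
    rw [hi, if_pos hm]
    rfl
  · have hmem : k ∉ hs := by simpa using hm
    rw [(PySem.List.index?_eq_none_iff hs k).mpr hmem, if_neg hm]

-- B's column is a row-wise map
lemma pv_column_eq_map (hs : List String) (rows : List (List String)) (k : String) :
    pvColumn hs rows k = rows.map (pvColF hs k) := by
  unfold pvColumn pvColF
  by_cases hm : hs.contains k
  · rw [if_pos hm]
    exact List.map_congr_left (fun r _ => by rw [if_pos hm])
  · rw [if_neg hm]
    rw [show (List.replicate rows.length "") = rows.map (fun _ => "") from
      (by simp : List.map (fun _ => "") rows = List.replicate rows.length "").symm]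
    exact List.map_congr_left (fun r _ => by rw [if_neg hm])

-- an append-if loop from [] is a filter-map (bridges Prop ite to PySem.List.foldl_append_if)
lemma pv_foldl_ite {α β : Type} (P : α → Prop) [DecidablePred P] (f : α → β) (l : List α) :
    l.foldl (fun acc x => if P x then acc ++ [f x] else acc) [] =
      (l.filter (fun x => decide (P x))).map f := by
  simpa using PySem.List.foldl_append_if (fun x => decide (P x)) f l []

set_option maxHeartbeats 1000000 in
theorem pv_main (output : String) (hpre : Pre_parse_windows_tasklist_py output) :
    parse_windows_tasklist_py output = parse_windows_tasklist_py_alt output := by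
  unfold Pre_parse_windows_tasklist_py at hpre
  unfold parse_windows_tasklist_py parse_windows_tasklist_py_alt
  simp only at hpre ⊢
  generalize hL : (PySem.Str.split? (PySem.Str.strip output) "\n").getD [] = lines
  rw [hL] at hpre
  by_cases hlen : 1 < lines.length
  · rw [if_pos hlen, if_neg (show ¬ lines.length < 2 by omega)]
    obtain ⟨h1, h2, h3, h4⟩ := hpre
    simp only [pv_column_eq_map, List.zip_map', List.map_map, List.filter_map]
    rw [pv_foldl_ite (fun line =>
      (pvSplitVals (lines.getD 0 "")).length ≤ (pvSplitVals line).length)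
      (fun line =>
        let values := pvSplitVals line
        let hs := pvSplitVals (lines.getD 0 "")
        let proc_info := (List.range hs.length).foldl
          (fun d i => d.insert (hs.getD i "") (values.getD i "")) PySem.Dict.empty
        [("name", proc_info.getD "Image Name" ""),
         ("pid", proc_info.getD "PID" ""),
         ("user", proc_info.getD "User Name" ""),
         ("command", if proc_info.getD "Window Title" "" = ""
                     then proc_info.getD "Image Name" ""
                     else proc_info.getD "Window Title" "")]) lines.tail]
    refine List.map_congr_left (fun line _ => ?_)
    simp only [Function.comp]
    rw [pv_dict_eq_colF _ _ _ h1, pv_dict_eq_colF _ _ _ h2,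
        pv_dict_eq_colF _ _ _ h3, pv_dict_eq_colF _ _ _ h4]
  · rw [if_neg hlen, if_pos (show lines.length < 2 by omega)]

-- ===== VERDICT =====
theorem parse_windows_tasklist_py_spec : Claim_equal_parse_windows_tasklist_py := by
  intro output _ hpre
  unfold Spec_parse_windows_tasklist_py
  exact pv_main output hpre
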